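-- pv_equiv track=rewrite | github.com/Unidata/awips2 | cotsSource/org.apache.qpid/cpp/managementgen/qmfgen/schema.py | makeValidCppSymbol
-- ===== SOURCE A (Python) =====
-- def makeValidCppSymbol(input):
--   output = str()
--   capitalize = False
--
--   for char in input:
--     skip = False
--
--     if char == ".":
--       capitalize = True
--       skip = True
--
--     if not skip:
--       output += capitalize and char.upper() or char
--
--       capitalize = False
--
--   return output
-- ===== SOURCE B (Python) =====
-- def makeValidCppSymbol(input):
--     parts = input.split('.')
--     return parts[0] + ''.join(p[:1].upper() + p[1:] for p in parts[1:])
-- ===== Notes on version B (the rewrite author's own statement) =====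
-- stated objective: simpler
-- what changed: Replaces A's char-by-char capitalize-flag state machine (with per-character string concatenation) by a token pass: split the input on the separator and concatenate the first segment with each later segment first-letter-uppercased; empty segments contribute the empty string, reproducing A's collapsing of repeated separators.
import Mathlib
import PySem

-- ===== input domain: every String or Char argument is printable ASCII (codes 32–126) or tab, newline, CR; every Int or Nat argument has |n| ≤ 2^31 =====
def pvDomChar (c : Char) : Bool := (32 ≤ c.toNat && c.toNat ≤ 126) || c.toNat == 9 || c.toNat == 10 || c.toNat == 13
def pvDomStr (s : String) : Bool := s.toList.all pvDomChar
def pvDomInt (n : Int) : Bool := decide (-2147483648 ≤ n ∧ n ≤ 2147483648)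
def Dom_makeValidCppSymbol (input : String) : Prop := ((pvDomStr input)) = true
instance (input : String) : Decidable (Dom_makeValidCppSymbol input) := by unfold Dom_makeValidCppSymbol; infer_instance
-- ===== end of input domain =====

-- B replaces A's char-by-char capitalize-flag state machine with a split('.')-based
-- token pass (objective: simpler/idiomatic); same return value for every string input.

-- ===== PORT A =====
-- one loop step of A: '.' sets capitalize and skips; otherwise append
-- `capitalize and char.upper() or char` (char.upper() of one char is never falsy,
-- so this is: uppercase the char iff capitalize) and clear capitalize
def mvcsStep (st : List Char × Bool) (char : Char) : List Char × Bool :=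
  if char = '.' then (st.1, true)
  else (st.1 ++ [if st.2 then PySem.Chars.upperChar char else char], false)

def makeValidCppSymbol (input : String) : String :=
  String.mk (input.toList.foldl mvcsStep ([], false)).1

-- ===== PORT B =====
-- p[:1].upper() + p[1:] : uppercase the first character, keep the rest
def mvcsCapFirst (p : List Char) : List Char :=
  match p with
  | [] => []
  | c :: rest => PySem.Chars.upperChar c :: rest

def makeValidCppSymbol_alt (input : String) : String :=
  match PySem.Chars.splitOn input.toList ['.'] with
  | [] => ""   -- unreachable: str.split always returns at least one part
  | p :: rest => String.mk (p ++ (rest.map mvcsCapFirst).flatten)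

-- ===== PRECONDITION & SPEC =====
def Spec_makeValidCppSymbol (input : String) (out : String) : Prop := out = makeValidCppSymbol_alt input
instance (input : String) (out : String) : Decidable (Spec_makeValidCppSymbol input out) := by unfold Spec_makeValidCppSymbol; infer_instance

-- ===== CLAIM (what is proved, stated in full; the proofs are below) =====
def Claim_equal_makeValidCppSymbol : Prop := ∀ (input : String), Dom_makeValidCppSymbol input → Spec_makeValidCppSymbol input (makeValidCppSymbol input)

-- ===== LEMMAS AND PROOFS =====

-- what A's loop emits starting from capitalize flag `cap`
def mvcsG (cap : Bool) : List Char → List Char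
  | [] => []
  | c :: t => if c = '.' then mvcsG true t
              else (if cap then PySem.Chars.upperChar c else c) :: mvcsG false t

theorem foldl_mvcsStep : ∀ (l : List Char) (out : List Char) (cap : Bool),
    (l.foldl mvcsStep (out, cap)).1 = out ++ mvcsG cap l := by
  intro l
  induction l with
  | nil => intro out cap; simp [mvcsG]
  | cons c t ih =>
    intro out cap
    by_cases hc : c = '.'
    · subst hc; simp [List.foldl, mvcsStep, mvcsG, ih]
    · simp [List.foldl, mvcsStep, mvcsG, hc, ih]

-- reference split: first chunk is pre ++ (chars up to the first '.'), then recurse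
def mysplit (pre : List Char) : List Char → List (List Char)
  | [] => [pre]
  | c :: t => if c = '.' then pre :: mysplit [] t else mysplit (pre ++ [c]) t

theorem go_spec : ∀ (fuel : Nat) (l cur : List Char) (acc : List (List Char)), l.length ≤ fuel →
    PySem.Chars.splitOn.go ['.'] fuel l cur acc = acc.reverse ++ mysplit cur.reverse l := by
  intro fuel
  induction fuel with
  | zero =>
    intro l cur acc h
    have : l = [] := List.eq_nil_of_length_eq_zero (Nat.le_zero.mp h)
    subst this
    rw [PySem.Chars.splitOn.go.eq_def]
    simp [mysplit]
  | succ n ih =>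
    intro l cur acc h
    match l with
    | [] =>
      rw [PySem.Chars.splitOn.go.eq_def]
      simp [mysplit]
    | c :: rest =>
      rw [PySem.Chars.splitOn.go.eq_def]
      by_cases hc : c = '.'
      · subst hc
        have hp : List.isPrefixOf ['.'] ('.' :: rest) = true := by
          simp [List.isPrefixOf]
        simp only [hp, if_pos]
        rw [ih]
        · simp [mysplit]
        · simpa using Nat.le_of_succ_le_succ h
      · have hp : List.isPrefixOf ['.'] (c :: rest) = false := by
          simp [List.isPrefixOf, Ne.symm hc]
        simp only [hp]
        rw [if_neg (by simp), ih rest (c :: cur) acc (Nat.le_of_succ_le_succ h)]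
        simp [mysplit, hc]

theorem splitOn_eq_mysplit (l : List Char) :
    PySem.Chars.splitOn l ['.'] = mysplit [] l := by
  show PySem.Chars.splitOn.go ['.'] (l.length + 1) l [] [] = mysplit [] l
  rw [go_spec (l.length + 1) l [] [] (Nat.le_succ _)]
  simp

theorem mysplit_ne_nil (l pre : List Char) : mysplit pre l ≠ [] := by
  cases l with
  | nil => simp [mysplit]
  | cons c t => by_cases hc : c = '.' <;> simp [mysplit, hc] <;> exact mysplit_ne_nil t _

def capJoin (parts : List (List Char)) : List Char := (parts.map mvcsCapFirst).flatten

theorem capJoin_mysplit : ∀ (l pre : List Char),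
    capJoin (mysplit pre l) =
      (if pre = [] then mvcsG true l else mvcsCapFirst pre ++ mvcsG false l) := by
  intro l
  induction l with
  | nil =>
    intro pre
    cases pre <;> simp [mysplit, capJoin, mvcsG, mvcsCapFirst]
  | cons c t ih =>
    intro pre
    by_cases hc : c = '.'
    · subst hc
      have h0 := ih []
      cases pre with
      | nil => simp [mysplit, capJoin, mvcsG, mvcsCapFirst] at h0 ⊢; exact h0
      | cons d pr =>
        simp [mysplit, capJoin, mvcsG, mvcsCapFirst] at h0 ⊢
        exact h0
    · have h1 := ih (pre ++ [c])
      have hne : pre ++ [c] ≠ [] := by simp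
      rw [if_neg hne] at h1
      cases pre with
      | nil =>
        simp only [List.nil_append] at h1
        simp [mysplit, hc, mvcsG, h1, mvcsCapFirst]
      | cons d pr =>
        simp [mysplit, hc, mvcsG, mvcsCapFirst] at h1 ⊢
        rw [h1]

theorem headJoin_mysplit : ∀ (l pre : List Char),
    (match mysplit pre l with
     | [] => []
     | p :: rest => p ++ capJoin rest) = pre ++ mvcsG false l := by
  intro l
  induction l with
  | nil => intro pre; simp [mysplit, capJoin, mvcsG]
  | cons c t ih =>
    intro pre
    by_cases hc : c = '.'
    · subst hc
      have h0 := capJoin_mysplit t []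
      simp [mysplit, mvcsG, h0]
    · have h1 := ih (pre ++ [c])
      simp [mysplit, hc, mvcsG] at h1 ⊢
      rw [h1]

-- ===== VERDICT (by name: the statement is the Claim_ definition above) =====
theorem makeValidCppSymbol_spec : Claim_equal_makeValidCppSymbol := by
  intro input _
  unfold Spec_makeValidCppSymbol makeValidCppSymbol makeValidCppSymbol_alt
  rw [splitOn_eq_mysplit, foldl_mvcsStep]
  have h := headJoin_mysplit input.toList []
  cases hm : mysplit [] input.toList with
  | nil => exact absurd hm (mysplit_ne_nil _ _)
  | cons p rest =>
    rw [hm] at h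
    simp only at h
    simp [← h, capJoin]
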